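-- pv_equiv track=rewrite | github.com/ninjawill543/Homemade_WAF | code/checks/bot.py | count_ips
-- ===== SOURCE A (Python) =====
-- def count_ips(logs: [[str]]) -> ([str], [int]):
--     if len(logs) == 0:
--         return [], []
--     ip = [logs[0][1]]
--     count = [0]
--     for i in logs:
--         for k in range(len(ip)):
--             if i[1] == ip[k]:
--                 count[k] += 1
--                 break
--             if k == len(ip)-1:
--                 ip.append(i[1])
--                 count.append(1)
--     return ip, count
-- ===== SOURCE B (Python) =====
-- def count_ips(logs):
--     ips = []
--     for log in logs:
--         if log[1] not in ips:
--             ips.append(log[1])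
--     counts = [sum(1 for log in logs if log[1] == ip) for ip in ips]
--     return ips, counts
-- ===== Notes on version B (the rewrite author's own statement) =====
-- stated objective: simpler
-- what changed: A makes one pass mutating parallel ip/count lists with an index-scanning inner loop and break; B makes two separate passes: first build the first-occurrence distinct list, then count each distinct IP over all logs.
import Mathlib
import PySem

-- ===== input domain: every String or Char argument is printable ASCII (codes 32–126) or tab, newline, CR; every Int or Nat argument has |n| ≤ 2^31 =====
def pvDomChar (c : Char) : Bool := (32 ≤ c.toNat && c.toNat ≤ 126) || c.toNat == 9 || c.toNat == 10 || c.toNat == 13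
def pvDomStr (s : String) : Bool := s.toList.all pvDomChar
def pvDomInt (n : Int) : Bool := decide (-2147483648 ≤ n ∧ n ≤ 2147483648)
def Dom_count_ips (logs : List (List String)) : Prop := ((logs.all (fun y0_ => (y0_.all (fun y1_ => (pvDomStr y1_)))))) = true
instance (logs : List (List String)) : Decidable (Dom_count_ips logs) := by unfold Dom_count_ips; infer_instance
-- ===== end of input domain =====

-- B is simpler: A makes one pass mutating parallel ip/count lists with an index-scanning
-- inner loop and break; B builds the distinct-IP list in one pass and counts each in a second pass.

-- ===== PORT A =====
-- inner 'for k in range(len(ip))' of A, transliterated as structural recursion over the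
-- parallel ip/count lists: first branch = 'i[1] == ip[k]: count[k] += 1; break',
-- second = 'k == len(ip)-1: append', otherwise next k.
def innerA (x : String) : List String → List Int → List String × List Int
  | a :: ips, c :: cs =>
    if x == a then (a :: ips, (c + 1) :: cs)
    else if ips.length = 0 then (a :: ips ++ [x], c :: cs ++ [1])
    else
      let r := innerA x ips cs
      (a :: r.1, c :: r.2)
  | ip, cs => (ip, cs)

-- rows are accessed as i[1]; Pre_count_ips guarantees the index is in range, so the "" default is never used
def count_ips (logs : List (List String)) : List String × List Int :=
  match logs with
  | [] => ([], [])
  | first :: _ =>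
    logs.foldl (fun st i => innerA (PySem.List.pyGetD i 1 "") st.1 st.2)
      ([PySem.List.pyGetD first 1 ""], [0])

-- ===== PORT B =====
def distinctB (logs : List (List String)) : List String :=
  logs.foldl (fun acc i =>
    let x := PySem.List.pyGetD i 1 ""
    if acc.contains x then acc else acc ++ [x]) []

def count_ips_alt (logs : List (List String)) : List String × List Int :=
  let ips := distinctB logs
  (ips, ips.map (fun v => (logs.countP (fun i => PySem.List.pyGetD i 1 "" == v) : Int)))

-- ===== PRECONDITION & SPEC =====
-- Pre_ excludes exactly the inputs on which Python A raises IndexError: a row with fewer than 2 fields.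
def Pre_count_ips (logs : List (List String)) : Prop := ∀ i ∈ logs, 2 ≤ i.length
instance (logs : List (List String)) : Decidable (Pre_count_ips logs) := by unfold Pre_count_ips; infer_instance
def pvWitness_count_ips : List (List String) := [["u", "1.2.3.4"], ["v", "5.6.7.8"], ["w", "1.2.3.4"]]

def Spec_count_ips (logs : List (List String)) (out : List String × List Int) : Prop := out = count_ips_alt logs
instance (logs : List (List String)) (out : List String × List Int) : Decidable (Spec_count_ips logs out) := by unfold Spec_count_ips; infer_instance

-- ===== CLAIM (what is proved, stated in full; the proofs are below) =====
def Claim_equal_count_ips : Prop := ∀ (logs : List (List String)), Dom_count_ips logs → Pre_count_ips logs → Spec_count_ips logs (count_ips logs)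

-- ===== LEMMAS AND PROOFS =====

def xmap (i : List String) : String := PySem.List.pyGetD i 1 ""

def dstep (acc : List String) (x : String) : List String :=
  if acc.contains x then acc else acc ++ [x]

def D (init : List String) (xs : List String) : List String := xs.foldl dstep init

theorem mem_D (init xs : List String) (a : String) :
    a ∈ D init xs ↔ a ∈ init ∨ a ∈ xs := by
  induction xs generalizing init with
  | nil => simp [D]
  | cons x t ih =>
    simp only [D, List.foldl_cons]
    rw [show (List.foldl dstep (dstep init x) t) = D (dstep init x) t from rfl, ih]
    unfold dstep
    split_ifs with h
    · simp only [List.contains_eq_mem, decide_eq_true_eq] at h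
      constructor
      · rintro (h1 | h2) <;> simp_all
      · rintro (h1 | h2)
        · exact Or.inl h1
        · rcases List.mem_cons.mp h2 with rfl | h3
          · exact Or.inl h
          · exact Or.inr h3
    · simp only [List.mem_append, List.mem_cons]
      tauto

theorem nodup_D (init xs : List String) (h : init.Nodup) : (D init xs).Nodup := by
  induction xs generalizing init with
  | nil => exact h
  | cons x t ih =>
    simp only [D, List.foldl_cons]
    apply ih
    unfold dstep
    split_ifs with hc
    · exact h
    · simp only [List.contains_eq_mem, decide_eq_true_eq] at hc
      apply List.Nodup.append h (List.nodup_singleton x)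
      intro a ha hax
      simp only [List.mem_singleton] at hax
      exact hc (hax ▸ ha)

theorem D_append_one (init xs : List String) (x : String) :
    D init (xs ++ [x]) = dstep (D init xs) x := by
  simp [D, List.foldl_append]

-- key behaviour of A's inner loop on a nodup nonempty ip whose counts are read off by f
theorem innerA_spec (x : String) (ip : List String) (f : String → Int)
    (hne : ip ≠ []) (hnd : ip.Nodup) :
    innerA x ip (ip.map f) =
      if x ∈ ip then (ip, ip.map (fun v => f v + if v = x then 1 else 0))
      else (ip ++ [x], ip.map f ++ [1]) := by
  induction ip with
  | nil => exact absurd rfl hne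
  | cons a t ih =>
    by_cases hx : x = a
    · subst hx
      have hxt : x ∉ t := (List.nodup_cons.mp hnd).1
      have htail : t.map (fun v => f v + if v = x then 1 else 0) = t.map f := by
        apply List.map_congr_left
        intro v hv
        have : v ≠ x := fun h => hxt (h ▸ hv)
        simp [this]
      simp [innerA, htail]
    · have hax : a ≠ x := fun h => hx h.symm
      have hxb : (x == a) = false := by simp [hx]
      cases t with
      | nil =>
        simp only [innerA, hxb, Bool.false_eq_true, if_false, List.length_nil,
          List.map_cons, List.map_nil]
        simp [hx]
      | cons b t2 =>
        have hne2 : (b :: t2 : List String) ≠ [] := by simp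
        have hnd2 : (b :: t2).Nodup := (List.nodup_cons.mp hnd).2
        have hih := ih hne2 hnd2
        simp only [List.map_cons] at hih ⊢
        rw [show innerA x (a :: b :: t2) (f a :: f b :: List.map f t2) =
            (a :: (innerA x (b :: t2) (f b :: List.map f t2)).1,
             f a :: (innerA x (b :: t2) (f b :: List.map f t2)).2) from by
          simp [innerA, hxb]]
        rw [show (f b :: List.map f t2) = List.map f (b :: t2) from rfl] at hih ⊢
        rw [hih]
        by_cases hm : x ∈ b :: t2
        · rw [if_pos hm, if_pos (List.mem_cons_of_mem a hm)]
          simp [hax]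
        · have : x ∉ a :: b :: t2 := by
            simp only [List.mem_cons] at hm ⊢
            tauto
          rw [if_neg hm, if_neg this]
          simp

def cnt (xs : List String) (v : String) : Int := (xs.count v : Int)

theorem cnt_append_one (xs : List String) (x v : String) :
    cnt (xs ++ [x]) v = cnt xs v + if v = x then 1 else 0 := by
  unfold cnt
  rw [List.count_append]
  by_cases h : v = x
  · subst h
    simp
  · have h' : x ≠ v := fun hh => h hh.symm
    simp [h, h']

-- invariant step: A's state over seen values x0::seen is (D [] (x0::seen), its counts in seen)
theorem step_inv (x0 x : String) (seen : List String) :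
    innerA x (D [] (x0 :: seen)) ((D [] (x0 :: seen)).map (cnt seen)) =
      (D [] (x0 :: (seen ++ [x])), (D [] (x0 :: (seen ++ [x]))).map (cnt (seen ++ [x]))) := by
  have hne : D [] (x0 :: seen) ≠ [] := by
    have : x0 ∈ D [] (x0 :: seen) := (mem_D _ _ _).mpr (Or.inr (by simp))
    exact List.ne_nil_of_mem this
  have hnd : (D [] (x0 :: seen)).Nodup := nodup_D _ _ (by simp)
  rw [innerA_spec x _ (cnt seen) hne hnd]
  have hD : D [] (x0 :: (seen ++ [x])) = dstep (D [] (x0 :: seen)) x := by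
    rw [show x0 :: (seen ++ [x]) = (x0 :: seen) ++ [x] from rfl]
    exact D_append_one _ _ _
  by_cases hm : x ∈ D [] (x0 :: seen)
  · rw [if_pos hm]
    have hc : (D [] (x0 :: seen)).contains x = true := by
      simpa [List.contains_eq_mem] using hm
    have hsame : D [] (x0 :: (seen ++ [x])) = D [] (x0 :: seen) := by
      rw [hD]; unfold dstep; rw [if_pos hc]
    rw [hsame]
    congr 1
    apply List.map_congr_left
    intro v _
    rw [cnt_append_one]
  · rw [if_neg hm]
    have hc : ¬ ((D [] (x0 :: seen)).contains x = true) := by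
      simp only [List.contains_eq_mem, decide_eq_true_eq]
      exact hm
    have hDx : D [] (x0 :: (seen ++ [x])) = D [] (x0 :: seen) ++ [x] := by
      rw [hD]; unfold dstep; rw [if_neg hc]
    have hxseen : x ∉ seen := fun h =>
      hm ((mem_D _ _ _).mpr (Or.inr (by simp [h])))
    rw [hDx]
    congr 1
    rw [List.map_append]
    congr 1
    · apply List.map_congr_left
      intro v hv
      have hvx : v ≠ x := fun h => hm (h ▸ hv)
      rw [cnt_append_one, if_neg hvx, add_zero]
    · simp only [List.map_cons, List.map_nil]
      unfold cnt
      rw [List.count_append]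
      simp [List.count_eq_zero_of_not_mem hxseen]

-- the whole outer loop of A, by induction on the remaining logs
theorem loop_inv (x0 : String) (rest : List (List String)) (seen : List String) :
    rest.foldl (fun st i => innerA (xmap i) st.1 st.2)
        (D [] (x0 :: seen), (D [] (x0 :: seen)).map (cnt seen)) =
      (D [] (x0 :: (seen ++ rest.map xmap)),
       (D [] (x0 :: (seen ++ rest.map xmap))).map (cnt (seen ++ rest.map xmap))) := by
  induction rest generalizing seen with
  | nil => simp
  | cons i t ih =>
    simp only [List.foldl_cons, List.map_cons]
    rw [step_inv x0 (xmap i) seen, ih (seen ++ [xmap i])]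
    simp

theorem D_dup_head (x0 : String) (t : List String) :
    D [] (x0 :: x0 :: t) = D [] (x0 :: t) := by
  simp [D, dstep, List.foldl_cons]

theorem countP_eq_cnt (logs : List (List String)) (v : String) :
    (logs.countP (fun i => PySem.List.pyGetD i 1 "" == v) : Int) = cnt (logs.map xmap) v := by
  unfold cnt
  rw [show (logs.map xmap).count v = List.countP (fun y => y == v) (logs.map xmap) from rfl,
    List.countP_map]
  rfl

-- ===== VERDICT (by name: the statement is the Claim_ definition above) =====
theorem count_ips_spec : Claim_equal_count_ips := by
  intro logs _ _
  unfold Spec_count_ips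
  cases logs with
  | nil => rfl
  | cons first rest =>
    have hA : count_ips (first :: rest) =
        List.foldl (fun st i => innerA (xmap i) st.1 st.2)
          (D [] (xmap first :: []), (D [] (xmap first :: [])).map (cnt []))
          (first :: rest) := rfl
    have hdis : distinctB (first :: rest) = D [] ((first :: rest).map xmap) := by
      simp only [D, List.foldl_map]
      rfl
    rw [hA, loop_inv (xmap first) (first :: rest) []]
    unfold count_ips_alt
    rw [hdis]
    simp only [List.nil_append, List.map_cons]
    rw [D_dup_head]
    congr 1
    apply List.map_congr_left
    intro v _
    have := (countP_eq_cnt (first :: rest) v).symm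
    simp only [List.map_cons] at this
    exact this
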